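-- pv_equiv track=rewrite | github.com/InterDigitalInc/NeoRadium | neoradium/utils.py | goldSequence
-- ===== SOURCE A (Python) =====
-- def goldSequence(cInit, numBits):                                       # Not documented - Not intended for direct use
--     # This function creates a "numBits"-bit Gold sequence bitstream
--     # using binary arithmetic with pre-calculated x1
--     x1 = 0x42054D21     # Pre-calculated X1 (After 51 iterations)
--     x2 = cInit          # X2 depends on "cInit".
--     # Now pre-calculate x2:
--     for _ in range(51):
--         x2 ^= (x2>>3) ^ (x2>>2) ^ (x2>>1)
--         x2 ^= ((x2<<28) ^ (x2<<29) ^ (x2<<30))&0x7FFFFFFF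
--
--     # First time, compute 12 bits
--     c = (x1^x2)                             # 12 bits
--     bits = [(c>>i)&1 for i in range(19,31)] # Pick the 12 MSBs
--
--     remainingBits = numBits-12
--     while remainingBits>0:
--         x1 ^= (x1>>3)
--         x1 ^= (x1<<28)&0x7FFFFFFF
--         x2 ^= (x2>>3) ^ (x2>>2) ^ (x2>>1)
--         x2 ^= ((x2<<28) ^ (x2<<29) ^ (x2<<30))&0x7FFFFFFF
--         c = (x1^x2)                # 31 bits
--         bits += [(c>>i)&1 for i in range(31)]
--         remainingBits -=31
--
--     return bits[:numBits]
-- ===== SOURCE B (Python) =====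
-- def goldSequence(cInit, numBits):
--     # Standard 3GPP bit-at-a-time Gold sequence: per-bit LFSR recurrences with
--     # Nc=1600 discarded warm-up bits, one output bit appended per position.
--     Nc = 1600
--     n = numBits if numBits > 0 else 0
--     x1 = [1] + [0] * 30
--     x2 = [(cInit >> i) & 1 for i in range(31)]
--     for i in range(Nc + n):
--         x1.append(x1[i + 3] ^ x1[i])
--         x2.append(x2[i + 3] ^ x2[i + 2] ^ x2[i + 1] ^ x2[i])
--     return [x1[Nc + i] ^ x2[Nc + i] for i in range(n)]
-- ===== Notes on version B (the rewrite author's own statement) =====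
-- stated objective: idiomatic
-- what changed: Replaces the 31-bit word-parallel register updates (xor/shift/mask tricks on whole words, 12-bit first-word extraction, slicing) with the textbook 3GPP bit-at-a-time Gold generator: two bit arrays advanced by the per-bit recurrences x1[n+31]=x1[n+3]^x1[n], x2[n+31]=x2[n+3]^x2[n+2]^x2[n+1]^x2[n], skipping Nc=1600 warm-up bits.
-- intended difference: For -12 < numBits < 0, A's final bits[:numBits] negative-slice accidentally returns the first 12+numBits bits of the sequence, while B returns [] — the intended result when a non-positive number of bits is requested. — e.g. on goldSequence(0, -1): A returns [0, 0, 0, 0, 0, 0, 1, 0, 0, 0, 0], B returns []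
-- outside the precondition, e.g. on goldSequence(-1, 2): A returns [0, 0], B returns [1, 1]
import Mathlib
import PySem

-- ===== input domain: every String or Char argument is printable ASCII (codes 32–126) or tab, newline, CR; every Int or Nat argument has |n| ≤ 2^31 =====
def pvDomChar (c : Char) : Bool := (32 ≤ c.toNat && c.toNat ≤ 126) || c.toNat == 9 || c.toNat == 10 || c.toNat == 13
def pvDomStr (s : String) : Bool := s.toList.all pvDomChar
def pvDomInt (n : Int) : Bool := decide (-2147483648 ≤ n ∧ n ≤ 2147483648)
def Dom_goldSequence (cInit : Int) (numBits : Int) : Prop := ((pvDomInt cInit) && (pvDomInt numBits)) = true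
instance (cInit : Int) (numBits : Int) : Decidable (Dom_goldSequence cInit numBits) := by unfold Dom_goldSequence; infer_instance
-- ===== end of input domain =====

-- B generates the sequence with the textbook per-bit 3GPP LFSR recurrences over bit arrays
-- instead of A's 31-bit word-parallel xor/shift register updates (objective: idiomatic).

-- ===== PORT A =====
-- Python's  x >> i  for a nonnegative shift count
def pvShr (x : Int) (k : Nat) : Int := x >>> k

-- x2 ^= (x2>>3) ^ (x2>>2) ^ (x2>>1); x2 ^= ((x2<<28) ^ (x2<<29) ^ (x2<<30)) & 0x7FFFFFFF
def pvStepX2 (x2 : Int) : Int :=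
  let x2 := PySem.Int.bxor x2 (PySem.Int.bxor (PySem.Int.bxor (x2 >>> (3:Nat)) (x2 >>> (2:Nat))) (x2 >>> (1:Nat)))
  PySem.Int.bxor x2 (PySem.Int.band (PySem.Int.bxor (PySem.Int.bxor (x2 <<< (28:Nat)) (x2 <<< (29:Nat))) (x2 <<< (30:Nat))) 0x7FFFFFFF)

-- x1 ^= (x1>>3); x1 ^= (x1<<28) & 0x7FFFFFFF
def pvStepX1 (x1 : Int) : Int :=
  let x1 := PySem.Int.bxor x1 (x1 >>> (3:Nat))
  PySem.Int.bxor x1 (PySem.Int.band (x1 <<< (28:Nat)) 0x7FFFFFFF)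

-- the 'while remainingBits > 0' loop; fuel only makes the recursion structural (each
-- iteration decreases remaining by 31, so fuel = numBits.toNat is never exhausted)
def pvGoldLoop (fuel : Nat) (x1 x2 : Int) (bits : List Int) (remaining : Int) : List Int :=
  match fuel with
  | 0 => bits
  | fuel + 1 =>
    if 0 < remaining then
      let x1 := pvStepX1 x1
      let x2 := pvStepX2 x2
      let c := PySem.Int.bxor x1 x2
      pvGoldLoop fuel x1 x2
        (bits ++ (PySem.List.pyRange 0 31 1).map (fun i => PySem.Int.band (pvShr c i.toNat) 1))
        (remaining - 31)
    else bits

def goldSequence (cInit : Int) (numBits : Int) : List Int :=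
  let x1 : Int := 0x42054D21
  let x2 : Int := (PySem.List.pyRange 0 51 1).foldl (fun x2 _ => pvStepX2 x2) cInit
  let c := PySem.Int.bxor x1 x2
  let bits := (PySem.List.pyRange 19 31 1).map (fun i => PySem.Int.band (pvShr c i.toNat) 1)
  let bits := pvGoldLoop numBits.toNat x1 x2 bits (numBits - 12)
  PySem.List.slice bits none (some numBits)

-- ===== PORT B =====
-- indices i, i+1, i+2, i+3, Nc+i are always in range, so pyGetD (exact there) ports xs[i]
def goldSequence_alt (cInit : Int) (numBits : Int) : List Int :=
  let Nc : Int := 1600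
  let n : Int := if 0 < numBits then numBits else 0
  let x1 : List Int := [1] ++ List.replicate 30 0
  let x2 : List Int := (PySem.List.pyRange 0 31 1).map (fun i => PySem.Int.band (pvShr cInit i.toNat) 1)
  let p := (PySem.List.pyRange 0 (Nc + n) 1).foldl
    (fun (p : List Int × List Int) i =>
      (p.1 ++ [PySem.Int.bxor (PySem.List.pyGetD p.1 (i + 3) 0) (PySem.List.pyGetD p.1 i 0)],
       p.2 ++ [PySem.Int.bxor (PySem.Int.bxor (PySem.Int.bxor (PySem.List.pyGetD p.2 (i + 3) 0)
                 (PySem.List.pyGetD p.2 (i + 2) 0)) (PySem.List.pyGetD p.2 (i + 1) 0))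
                 (PySem.List.pyGetD p.2 i 0)]))
    (x1, x2)
  (PySem.List.pyRange 0 n 1).map
    (fun i => PySem.Int.bxor (PySem.List.pyGetD p.1 (Nc + i) 0) (PySem.List.pyGetD p.2 (Nc + i) 0))

-- ===== PRECONDITION & SPEC =====
-- Pre_ excludes cInit outside the 31-bit seed range 0 ≤ cInit < 2^31 (the 3GPP domain of
-- cInit): there A's unbounded-int word arithmetic reads bits of cInit beyond bit 30 (and
-- sign bits), an artefact of Python big-int semantics that a 31-bit register generator
-- does not reproduce.
def Pre_goldSequence (cInit : Int) (numBits : Int) : Prop :=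
  0 ≤ cInit ∧ cInit < 2147483648
instance (cInit : Int) (numBits : Int) : Decidable (Pre_goldSequence cInit numBits) := by
  unfold Pre_goldSequence; infer_instance

def pvWitness_goldSequence : Int × Int := (3, 5)

-- For -12 < numBits < 0, A's final bits[:numBits] negative-slice accidentally returns the
-- first 12+numBits bits of the sequence, while B returns [] — the intended result when a
-- non-positive number of bits is requested.
def D_goldSequence (cInit : Int) (numBits : Int) : Prop := -12 < numBits ∧ numBits < 0
instance (cInit : Int) (numBits : Int) : Decidable (D_goldSequence cInit numBits) := by
  unfold D_goldSequence; infer_instance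

def Spec_goldSequence (cInit : Int) (numBits : Int) (out : List Int) : Prop :=
  ¬ D_goldSequence cInit numBits → out = goldSequence_alt cInit numBits
instance (cInit : Int) (numBits : Int) (out : List Int) : Decidable (Spec_goldSequence cInit numBits out) := by
  unfold Spec_goldSequence; infer_instance

def pvDiffWitness_goldSequence : Int × Int := (0, -1)
def pvDiffWitnessOut_goldSequence : (List Int) × (List Int) :=
  ([0, 0, 0, 0, 0, 0, 1, 0, 0, 0, 0], [])

-- ===== CLAIM (what is proved, stated in full; the proofs are below) =====
def Claim_unchanged_goldSequence : Prop := ∀ (cInit : Int) (numBits : Int),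
  Dom_goldSequence cInit numBits → Pre_goldSequence cInit numBits →
  Spec_goldSequence cInit numBits (goldSequence cInit numBits)
def Claim_changed_goldSequence : Prop :=
  Dom_goldSequence (pvDiffWitness_goldSequence.1) (pvDiffWitness_goldSequence.2) ∧
  Pre_goldSequence (pvDiffWitness_goldSequence.1) (pvDiffWitness_goldSequence.2) ∧
  D_goldSequence (pvDiffWitness_goldSequence.1) (pvDiffWitness_goldSequence.2) ∧
  goldSequence (pvDiffWitness_goldSequence.1) (pvDiffWitness_goldSequence.2) = pvDiffWitnessOut_goldSequence.1 ∧
  goldSequence_alt (pvDiffWitness_goldSequence.1) (pvDiffWitness_goldSequence.2) = pvDiffWitnessOut_goldSequence.2 ∧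
  pvDiffWitnessOut_goldSequence.1 ≠ pvDiffWitnessOut_goldSequence.2
def Claim_exact_goldSequence : Prop := ∀ (cInit : Int) (numBits : Int),
  Dom_goldSequence cInit numBits → Pre_goldSequence cInit numBits → D_goldSequence cInit numBits →
  goldSequence cInit numBits ≠ goldSequence_alt cInit numBits

-- ===== LEMMAS AND PROOFS =====

-- The reference bit streams of 3GPP TS 38.211 §5.2.1, as functions ℕ → Bool.
def pvS1 (n : Nat) : Bool :=
  if n < 31 then n = 0
  else pvS1 (n - 28) ^^ pvS1 (n - 31)
termination_by n
decreasing_by all_goals omega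

def pvS2 (c : Nat) (n : Nat) : Bool :=
  if n < 31 then c.testBit n
  else ((pvS2 c (n - 28) ^^ pvS2 c (n - 29)) ^^ pvS2 c (n - 30)) ^^ pvS2 c (n - 31)
termination_by n
decreasing_by all_goals omega

theorem pvS1_rec (n : Nat) : pvS1 (n + 31) = (pvS1 (n + 3) ^^ pvS1 n) := by
  have h1 : n + 31 - 28 = n + 3 := by omega
  have h2 : n + 31 - 31 = n := by omega
  conv_lhs => rw [pvS1]
  rw [if_neg (by omega), h1, h2]

theorem pvS2_rec (c n : Nat) :
    pvS2 c (n + 31) = (((pvS2 c (n + 3) ^^ pvS2 c (n + 2)) ^^ pvS2 c (n + 1)) ^^ pvS2 c n) := by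
  have h1 : n + 31 - 28 = n + 3 := by omega
  have h2 : n + 31 - 29 = n + 2 := by omega
  have h3 : n + 31 - 30 = n + 1 := by omega
  have h4 : n + 31 - 31 = n := by omega
  conv_lhs => rw [pvS2]
  rw [if_neg (by omega), h1, h2, h3, h4]

-- 0/1-valued Int image of a bit
def pvBit (b : Bool) : Int := if b then 1 else 0

theorem pvBit_xor (a b : Bool) : PySem.Int.bxor (pvBit a) (pvBit b) = pvBit (a ^^ b) := by
  cases a <;> cases b <;> decide

-- Nat mirrors of the word steps (within Pre_ the ports act on nonnegative Ints)
def pvNStep1 (w : Nat) : Nat :=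
  let v := w ^^^ (w >>> 3)
  v ^^^ ((v <<< 28) &&& 0x7FFFFFFF)

def pvNStep2 (w : Nat) : Nat :=
  let v := w ^^^ (((w >>> 3) ^^^ (w >>> 2)) ^^^ (w >>> 1))
  v ^^^ ((((v <<< 28) ^^^ (v <<< 29)) ^^^ (v <<< 30)) &&& 0x7FFFFFFF)

theorem pvCast_shiftRight (m k : Nat) : ((m : Int) >>> k) = ((m >>> k : Nat) : Int) := rfl
theorem pvCast_shiftLeft (m k : Nat) : ((m : Int) <<< k) = ((m <<< k : Nat) : Int) := rfl
theorem pvCast_mask : (0x7FFFFFFF : Int) = ((0x7FFFFFFF : Nat) : Int) := rfl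

theorem pvStepX1_cast (w : Nat) : pvStepX1 (w : Int) = ((pvNStep1 w : Nat) : Int) := by
  rw [pvStepX1, pvNStep1]
  rw [pvCast_shiftRight, PySem.Int.bxor_natCast, pvCast_shiftLeft, pvCast_mask,
    PySem.Int.band_natCast, PySem.Int.bxor_natCast]

theorem pvStepX2_cast (w : Nat) : pvStepX2 (w : Int) = ((pvNStep2 w : Nat) : Int) := by
  rw [pvStepX2, pvNStep2]
  rw [pvCast_shiftRight, pvCast_shiftRight, pvCast_shiftRight,
    PySem.Int.bxor_natCast, PySem.Int.bxor_natCast, PySem.Int.bxor_natCast,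
    pvCast_shiftLeft, pvCast_shiftLeft, pvCast_shiftLeft, pvCast_mask,
    PySem.Int.bxor_natCast, PySem.Int.bxor_natCast,
    PySem.Int.band_natCast, PySem.Int.bxor_natCast]

theorem pvBand_one_cast (n k : Nat) :
    PySem.Int.band (pvShr (n : Int) k) 1 = pvBit (n.testBit k) := by
  rw [pvShr, pvCast_shiftRight]
  rw [show (1 : Int) = ((1 : Nat) : Int) by norm_num, PySem.Int.band_natCast]
  have h : n.testBit k = ((n >>> k).testBit 0) := by
    rw [Nat.testBit_shiftRight, Nat.add_zero]
  rw [h, Nat.and_one_is_mod, Nat.testBit_zero, pvBit]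
  rcases Nat.mod_two_eq_zero_or_one (n >>> k) with h2 | h2 <;> simp [h2]

-- "word w holds stream bits m..m+30"
def pvCorr (w : Nat) (b : Nat → Bool) (m : Nat) : Prop :=
  w < 2 ^ 31 ∧ ∀ i, i < 31 → w.testBit i = b (m + i)

theorem pvMask_eq : (0x7FFFFFFF : Nat) = 2 ^ 31 - 1 := by norm_num

theorem pvStep1_corr {b : Nat → Bool} (hrec : ∀ n, b (n + 31) = (b (n + 3) ^^ b n))
    {w m} (h : pvCorr w b m) : pvCorr (pvNStep1 w) b (m + 31) := by
  obtain ⟨hw, hb⟩ := h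
  have hw31 : ∀ j, 31 ≤ j → w.testBit j = false := fun j hj =>
    Nat.testBit_eq_false_of_lt (lt_of_lt_of_le hw (Nat.pow_le_pow_right (by norm_num) hj))
  constructor
  · show _ ^^^ _ < 2 ^ 31
    apply Nat.xor_lt_two_pow
    · exact Nat.xor_lt_two_pow hw (lt_of_le_of_lt (Nat.shiftRight_le w 3) hw)
    · have := Nat.and_le_right (n := (w ^^^ w >>> 3) <<< 28) (m := 0x7FFFFFFF)
      omega
  · intro i hi
    show ((w ^^^ w >>> 3) ^^^ (w ^^^ w >>> 3) <<< 28 &&& 0x7FFFFFFF).testBit i = _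
    rw [pvMask_eq]
    simp only [Nat.testBit_xor, Nat.testBit_land, Nat.testBit_shiftLeft,
      Nat.testBit_shiftRight, Nat.testBit_two_pow_sub_one]
    by_cases h28 : i < 28
    · simp only [show ¬(i ≥ 28) from by omega, decide_false, Bool.false_and, Bool.xor_false]
      rw [hb i (by omega), hb (3 + i) (by omega)]
      have e := hrec (m + i)
      have g1 : m + 31 + i = m + i + 31 := by omega
      have g2 : m + (3 + i) = m + i + 3 := by omega
      rw [g2, g1, e, Bool.xor_comm]
    · interval_cases i
      · -- i = 28
        simp only [show decide ((28:Nat) ≥ 28) = true from rfl,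
          show decide ((28:Nat) < 31) = true from rfl,
          show (28:Nat) - 28 = 0 from rfl, show (3:Nat) + 0 = 3 from rfl,
          Bool.true_and, Bool.and_true]
        rw [hw31 (3 + 28) (by omega)]
        rw [hb 28 (by omega), hb 0 (by omega), hb 3 (by omega)]
        have g1 : m + 31 + 28 = m + 28 + 31 := by omega
        rw [g1, hrec (m + 28)]
        have g2 : m + 28 + 3 = m + 31 := by omega
        rw [g2, hrec m]
        simp [Bool.xor_assoc, Bool.xor_comm, Bool.xor_left_comm]
      · -- i = 29
        simp only [show decide ((29:Nat) ≥ 28) = true from rfl,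
          show decide ((29:Nat) < 31) = true from rfl,
          show (29:Nat) - 28 = 1 from rfl, show (3:Nat) + 1 = 4 from rfl,
          Bool.true_and, Bool.and_true]
        rw [hw31 (3 + 29) (by omega)]
        rw [hb 29 (by omega), hb 1 (by omega), hb 4 (by omega)]
        have g1 : m + 31 + 29 = m + 29 + 31 := by omega
        rw [g1, hrec (m + 29)]
        have g2 : m + 29 + 3 = m + 1 + 31 := by omega
        rw [g2, hrec (m + 1)]
        have g3 : m + 1 + 3 = m + 4 := by omega
        rw [g3]
        simp [Bool.xor_assoc, Bool.xor_comm, Bool.xor_left_comm]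
      · -- i = 30
        simp only [show decide ((30:Nat) ≥ 28) = true from rfl,
          show decide ((30:Nat) < 31) = true from rfl,
          show (30:Nat) - 28 = 2 from rfl, show (3:Nat) + 2 = 5 from rfl,
          Bool.true_and, Bool.and_true]
        rw [hw31 (3 + 30) (by omega)]
        rw [hb 30 (by omega), hb 2 (by omega), hb 5 (by omega)]
        have g1 : m + 31 + 30 = m + 30 + 31 := by omega
        rw [g1, hrec (m + 30)]
        have g2 : m + 30 + 3 = m + 2 + 31 := by omega
        rw [g2, hrec (m + 2)]
        have g3 : m + 2 + 3 = m + 5 := by omega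
        rw [g3]
        simp [Bool.xor_assoc, Bool.xor_comm, Bool.xor_left_comm]

theorem pvStep2_corr {b : Nat → Bool}
    (hrec : ∀ n, b (n + 31) = (((b (n + 3) ^^ b (n + 2)) ^^ b (n + 1)) ^^ b n))
    {w m} (h : pvCorr w b m) : pvCorr (pvNStep2 w) b (m + 31) := by
  obtain ⟨hw, hb⟩ := h
  have hw31 : ∀ j, 31 ≤ j → w.testBit j = false := fun j hj =>
    Nat.testBit_eq_false_of_lt (lt_of_lt_of_le hw (Nat.pow_le_pow_right (by norm_num) hj))
  constructor
  · show _ ^^^ _ < 2 ^ 31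
    apply Nat.xor_lt_two_pow
    · exact Nat.xor_lt_two_pow hw
        (Nat.xor_lt_two_pow
          (Nat.xor_lt_two_pow (lt_of_le_of_lt (Nat.shiftRight_le w 3) hw)
            (lt_of_le_of_lt (Nat.shiftRight_le w 2) hw))
          (lt_of_le_of_lt (Nat.shiftRight_le w 1) hw))
    · have := Nat.and_le_right
        (n := ((w ^^^ (w >>> 3 ^^^ w >>> 2 ^^^ w >>> 1)) <<< 28 ^^^
               (w ^^^ (w >>> 3 ^^^ w >>> 2 ^^^ w >>> 1)) <<< 29) ^^^
              (w ^^^ (w >>> 3 ^^^ w >>> 2 ^^^ w >>> 1)) <<< 30) (m := 0x7FFFFFFF)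
      omega
  · intro i hi
    show ((w ^^^ (w >>> 3 ^^^ w >>> 2 ^^^ w >>> 1)) ^^^
      ((w ^^^ (w >>> 3 ^^^ w >>> 2 ^^^ w >>> 1)) <<< 28 ^^^
       (w ^^^ (w >>> 3 ^^^ w >>> 2 ^^^ w >>> 1)) <<< 29 ^^^
       (w ^^^ (w >>> 3 ^^^ w >>> 2 ^^^ w >>> 1)) <<< 30) &&& 0x7FFFFFFF).testBit i = _
    rw [pvMask_eq]
    simp only [Nat.testBit_xor, Nat.testBit_land, Nat.testBit_shiftLeft,
      Nat.testBit_shiftRight, Nat.testBit_two_pow_sub_one]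
    by_cases h28 : i < 28
    · simp only [show ¬(i ≥ 28) from by omega, show ¬(i ≥ 29) from by omega,
        show ¬(i ≥ 30) from by omega, decide_false, Bool.false_and,
        Bool.xor_false, Bool.false_xor]
      rw [hb i (by omega), hb (3 + i) (by omega), hb (2 + i) (by omega), hb (1 + i) (by omega)]
      have g1 : m + 31 + i = m + i + 31 := by omega
      have g3 : m + (3 + i) = m + i + 3 := by omega
      have g4 : m + (2 + i) = m + i + 2 := by omega
      have g5 : m + (1 + i) = m + i + 1 := by omega
      rw [g1, g3, g4, g5, hrec (m + i)]
      simp [Bool.xor_comm, Bool.xor_left_comm]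
    · interval_cases i
      · -- i = 28
        simp only [show decide ((28:Nat) ≥ 28) = true from rfl,
          show decide ((28:Nat) ≥ 29) = false from rfl,
          show decide ((28:Nat) ≥ 30) = false from rfl,
          show decide ((28:Nat) < 31) = true from rfl,
          show (28:Nat) - 28 = 0 from rfl,
          show (3:Nat) + 0 = 3 from rfl, show (2:Nat) + 0 = 2 from rfl,
          show (1:Nat) + 0 = 1 from rfl,
          show (3:Nat) + 28 = 31 from rfl, show (2:Nat) + 28 = 30 from rfl,
          show (1:Nat) + 28 = 29 from rfl,
          decide_true, decide_false, Bool.true_and, Bool.and_true,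
          Bool.false_and, Bool.xor_false, Bool.false_xor]
        rw [hw31 31 (by omega)]
        rw [hb 28 (by omega), hb 29 (by omega), hb 30 (by omega),
          hb 0 (by omega), hb 1 (by omega), hb 2 (by omega), hb 3 (by omega)]
        have g1 : m + 31 + 28 = m + 28 + 31 := by omega
        rw [g1, hrec (m + 28)]
        have g2 : m + 28 + 3 = m + 31 := by omega
        have g3 : m + 28 + 2 = m + 30 := by omega
        have g4 : m + 28 + 1 = m + 29 := by omega
        rw [g2, g3, g4, hrec m]
        simp [Bool.xor_comm, Bool.xor_left_comm]
      · -- i = 29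
        simp only [show decide ((29:Nat) ≥ 28) = true from rfl,
          show decide ((29:Nat) ≥ 29) = true from rfl,
          show decide ((29:Nat) ≥ 30) = false from rfl,
          show decide ((29:Nat) < 31) = true from rfl,
          show (29:Nat) - 28 = 1 from rfl, show (29:Nat) - 29 = 0 from rfl,
          show (3:Nat) + 0 = 3 from rfl, show (2:Nat) + 0 = 2 from rfl,
          show (1:Nat) + 0 = 1 from rfl,
          show (3:Nat) + 1 = 4 from rfl, show (2:Nat) + 1 = 3 from rfl,
          show (1:Nat) + 1 = 2 from rfl,
          show (3:Nat) + 29 = 32 from rfl, show (2:Nat) + 29 = 31 from rfl,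
          show (1:Nat) + 29 = 30 from rfl,
          decide_true, decide_false, Bool.true_and, Bool.and_true,
          Bool.false_and, Bool.xor_false, Bool.false_xor]
        rw [hw31 31 (by omega), hw31 32 (by omega)]
        rw [hb 29 (by omega), hb 30 (by omega),
          hb 0 (by omega), hb 1 (by omega), hb 2 (by omega), hb 3 (by omega), hb 4 (by omega)]
        have g1 : m + 31 + 29 = m + 29 + 31 := by omega
        rw [g1, hrec (m + 29)]
        have g2 : m + 29 + 3 = m + 1 + 31 := by omega
        have g3 : m + 29 + 2 = m + 31 := by omega
        have g4 : m + 29 + 1 = m + 30 := by omega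
        rw [g2, g3, g4, hrec (m + 1), hrec m]
        have g5 : m + 1 + 3 = m + 4 := by omega
        have g6 : m + 1 + 2 = m + 3 := by omega
        have g7 : m + 1 + 1 = m + 2 := by omega
        rw [g5, g6, g7]
        simp [Bool.xor_comm, Bool.xor_left_comm]
      · -- i = 30
        simp only [show decide ((30:Nat) ≥ 28) = true from rfl,
          show decide ((30:Nat) ≥ 29) = true from rfl,
          show decide ((30:Nat) ≥ 30) = true from rfl,
          show decide ((30:Nat) < 31) = true from rfl,
          show (30:Nat) - 28 = 2 from rfl, show (30:Nat) - 29 = 1 from rfl,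
          show (30:Nat) - 30 = 0 from rfl,
          show (3:Nat) + 0 = 3 from rfl, show (2:Nat) + 0 = 2 from rfl,
          show (1:Nat) + 0 = 1 from rfl,
          show (3:Nat) + 1 = 4 from rfl, show (2:Nat) + 1 = 3 from rfl,
          show (1:Nat) + 1 = 2 from rfl,
          show (3:Nat) + 2 = 5 from rfl, show (2:Nat) + 2 = 4 from rfl,
          show (1:Nat) + 2 = 3 from rfl,
          show (3:Nat) + 30 = 33 from rfl, show (2:Nat) + 30 = 32 from rfl,
          show (1:Nat) + 30 = 31 from rfl,
          decide_true, decide_false, Bool.true_and, Bool.and_true,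
          Bool.false_and, Bool.xor_false, Bool.false_xor]
        rw [hw31 31 (by omega), hw31 32 (by omega), hw31 33 (by omega)]
        rw [hb 30 (by omega),
          hb 0 (by omega), hb 1 (by omega), hb 2 (by omega), hb 3 (by omega),
          hb 4 (by omega), hb 5 (by omega)]
        have g1 : m + 31 + 30 = m + 30 + 31 := by omega
        rw [g1, hrec (m + 30)]
        have g2 : m + 30 + 3 = m + 2 + 31 := by omega
        have g3 : m + 30 + 2 = m + 1 + 31 := by omega
        have g4 : m + 30 + 1 = m + 31 := by omega
        rw [g2, g3, g4, hrec (m + 2), hrec (m + 1), hrec m]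
        have g5 : m + 2 + 3 = m + 5 := by omega
        have g6 : m + 2 + 2 = m + 4 := by omega
        have g7 : m + 2 + 1 = m + 3 := by omega
        have g8 : m + 1 + 3 = m + 4 := by omega
        have g9 : m + 1 + 2 = m + 3 := by omega
        have g10 : m + 1 + 1 = m + 2 := by omega
        rw [g5, g6, g7, g8, g9, g10]
        simp [Bool.xor_comm, Bool.xor_left_comm]

theorem pvStep1_iter_corr {w m} (h : pvCorr w pvS1 m) (j : Nat) :
    pvCorr (pvNStep1^[j] w) pvS1 (m + 31 * j) := by
  induction j generalizing w m with
  | zero => simpa using h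
  | succ j ih =>
    have := ih (pvStep1_corr pvS1_rec h)
    rw [Function.iterate_succ_apply]
    have e : m + 31 + 31 * j = m + 31 * (j + 1) := by ring
    rw [e] at this; exact this

theorem pvStep2_iter_corr {c w m} (h : pvCorr w (pvS2 c) m) (j : Nat) :
    pvCorr (pvNStep2^[j] w) (pvS2 c) (m + 31 * j) := by
  induction j generalizing w m with
  | zero => simpa using h
  | succ j ih =>
    have := ih (pvStep2_corr (pvS2_rec c) h)
    rw [Function.iterate_succ_apply]
    have e : m + 31 + 31 * j = m + 31 * (j + 1) := by ring
    rw [e] at this; exact this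

-- number of iterations of A's while loop
def pvNIter (r : Int) : Nat :=
  if 0 < r then pvNIter (r - 31) + 1 else 0
termination_by r.toNat
decreasing_by omega

theorem pvNIter_ge (r : Int) : r ≤ 31 * (pvNIter r : Int) := by
  by_cases h : 0 < r
  · rw [pvNIter, if_pos h]
    have := pvNIter_ge (r - 31)
    push_cast
    omega
  · rw [pvNIter, if_neg h]
    omega
termination_by r.toNat
decreasing_by omega

theorem pvNIter_le (r : Int) : (pvNIter r : Int) ≤ max r 0 := by
  by_cases h : 0 < r
  · rw [pvNIter, if_pos h]
    have := pvNIter_le (r - 31)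
    push_cast
    omega
  · rw [pvNIter, if_neg h]
    omega
termination_by r.toNat
decreasing_by omega

-- the combined Gold stream for a given (Nat) seed
def pvG (c : Nat) (n : Nat) : Int := pvBit (pvS1 n ^^ pvS2 c n)

-- one 31-bit word of output bits lo..30, as stream values
theorem pvChunk (c w1 w2 m lo : Nat) (hlo : lo ≤ 31)
    (h1 : pvCorr w1 pvS1 m) (h2 : pvCorr w2 (pvS2 c) m) :
    (PySem.List.pyRange (lo : Int) 31 1).map
      (fun i => PySem.Int.band (pvShr (PySem.Int.bxor (w1 : Int) (w2 : Int)) i.toNat) 1) =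
    (List.range (31 - lo)).map (fun k => pvG c (m + lo + k)) := by
  rw [PySem.List.pyRange_one, List.map_map]
  rw [show ((31 : Int) - (lo : Int)).toNat = 31 - lo by omega]
  apply List.map_congr_left
  intro k hk
  rw [List.mem_range] at hk
  simp only [Function.comp_apply]
  rw [show ((lo : Int) + (k : Int)).toNat = lo + k by omega]
  rw [PySem.Int.bxor_natCast, pvBand_one_cast, Nat.testBit_xor, pvG]
  rw [h1.2 (lo + k) (by omega), h2.2 (lo + k) (by omega)]
  rw [show m + (lo + k) = m + lo + k by omega]

theorem pvLoop_eq (c : Nat) (fuel : Nat) :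
    ∀ (w1 w2 m : Nat) (bits : List Int) (r : Int),
    pvCorr w1 pvS1 m → pvCorr w2 (pvS2 c) m → pvNIter r ≤ fuel →
    pvGoldLoop fuel (w1 : Int) (w2 : Int) bits r =
      bits ++ (List.range (31 * pvNIter r)).map (fun k => pvG c (m + 31 + k)) := by
  induction fuel with
  | zero =>
    intro w1 w2 m bits r h1 h2 hf
    have h0 : pvNIter r = 0 := by omega
    simp [pvGoldLoop, h0]
  | succ fuel ih =>
    intro w1 w2 m bits r h1 h2 hf
    by_cases hr : 0 < r
    · simp only [pvGoldLoop]
      rw [if_pos hr]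
      have hit : pvNIter r = pvNIter (r - 31) + 1 := by rw [pvNIter, if_pos hr]
      rw [pvStepX1_cast, pvStepX2_cast]
      have hc1 := pvStep1_corr pvS1_rec h1
      have hc2 := pvStep2_corr (pvS2_rec c) h2
      have hch := pvChunk c (pvNStep1 w1) (pvNStep2 w2) (m + 31) 0 (by omega) hc1 hc2
      simp only [Nat.cast_zero, Nat.sub_zero, Nat.add_zero] at hch
      rw [hch]
      rw [ih (pvNStep1 w1) (pvNStep2 w2) (m + 31) _ (r - 31) hc1 hc2 (by omega)]
      rw [List.append_assoc]
      congr 1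
      rw [hit, show 31 * (pvNIter (r - 31) + 1) = 31 + 31 * pvNIter (r - 31) by ring,
        List.range_add, List.map_append, List.map_map]
      congr 1
      apply List.map_congr_left
      intro k hk
      simp only [Function.comp_apply]
      congr 1
      omega
    · simp only [pvGoldLoop]
      rw [if_neg hr]
      have h0 : pvNIter r = 0 := by rw [pvNIter, if_neg hr]
      simp [h0]

theorem pvFoldlConst {α β : Type} (l : List β) (g : α → α) (x : α) :
    l.foldl (fun a _ => g a) x = g^[l.length] x := by
  induction l generalizing x with
  | nil => rfl
  | cons y l ih => simp [List.foldl_cons, ih, Function.iterate_succ_apply]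

theorem pvIterX2_cast (j : Nat) (n : Nat) :
    (fun x => pvStepX2 x)^[j] (n : Int) = ((pvNStep2^[j] n : Nat) : Int) := by
  induction j generalizing n with
  | zero => rfl
  | succ j ih =>
    rw [Function.iterate_succ_apply, Function.iterate_succ_apply]
    show (fun x => pvStepX2 x)^[j] (pvStepX2 (n : Int)) = _
    rw [pvStepX2_cast, ih]

theorem pvCorr1_init : pvCorr 1 pvS1 0 := by
  constructor
  · norm_num
  · intro i hi
    rw [Nat.zero_add, pvS1, if_pos hi]
    rw [show (1 : Nat) = 2 ^ 0 by norm_num, Nat.testBit_two_pow]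
    simp [eq_comm]

theorem pvCorr2_init (c : Nat) (hc : c < 2 ^ 31) : pvCorr c (pvS2 c) 0 := by
  refine ⟨hc, fun i hi => ?_⟩
  rw [Nat.zero_add, pvS2, if_pos hi]

set_option maxRecDepth 10000 in
theorem pvX1_const : (0x42054D21 : Int) = ((pvNStep1^[51] 1 : Nat) : Int) := by decide

theorem pvA_char (cInit numBits : Int) (hc0 : 0 ≤ cInit) (hc : cInit < 2147483648) :
    goldSequence cInit numBits =
      PySem.List.slice
        ((List.range (12 + 31 * pvNIter (numBits - 12))).map
          (fun k => pvG cInit.toNat (1600 + k)))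
        none (some numBits) := by
  obtain ⟨cn, rfl⟩ : ∃ cn : Nat, cInit = (cn : Int) := ⟨cInit.toNat, by omega⟩
  have hclt : cn < 2 ^ 31 := by
    rw [show (2 : Nat) ^ 31 = 2147483648 by norm_num]
    exact_mod_cast hc
  simp only [Int.toNat_natCast]
  simp only [goldSequence]
  rw [pvFoldlConst]
  rw [show (PySem.List.pyRange 0 51 1).length = 51 from by
    rw [PySem.List.length_pyRange_one]; rfl]
  rw [pvIterX2_cast, pvX1_const]
  have h1 : pvCorr (pvNStep1^[51] 1) pvS1 1581 := by
    simpa using pvStep1_iter_corr pvCorr1_init 51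
  have h2 : pvCorr (pvNStep2^[51] cn) (pvS2 cn) 1581 := by
    simpa using pvStep2_iter_corr (pvCorr2_init cn hclt) 51
  have hch := pvChunk cn _ _ 1581 19 (by omega) h1 h2
  simp only [show ((19 : Nat) : Int) = (19 : Int) from by norm_num,
    show (31 - 19 : Nat) = 12 from rfl,
    show (1581 : Nat) + 19 = 1600 from rfl] at hch
  rw [hch]
  have hlp := pvLoop_eq cn numBits.toNat (pvNStep1^[51] 1) (pvNStep2^[51] cn) 1581
    ((List.range 12).map (fun k => pvG cn (1600 + k)))
    (numBits - 12) h1 h2 (by have := pvNIter_le (numBits - 12); omega)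
  simp only [show (1581 : Nat) + 31 = 1612 from rfl] at hlp
  rw [hlp]
  apply congrArg (fun xs => PySem.List.slice xs none (some numBits))
  rw [List.range_add, List.map_append, List.map_map]
  congr 1
  apply List.map_congr_left
  intro k hk
  simp only [Function.comp_apply]
  congr 1
  omega

theorem pvMapRangeGetD {α : Type} (f : Nat → α) (L t : Nat) (d : α) (h : t < L) :
    ((List.range L).map f).getD t d = f t := by
  rw [List.getD_eq_getElem?_getD, List.getElem?_map, List.getElem?_range h]
  rfl

theorem pvB_init1 : ([1] ++ List.replicate 30 0 : List Int) =
    (List.range 31).map (fun k => pvBit (pvS1 k)) := by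
  have hs : ∀ k, k < 31 → pvS1 k = decide (k = 0) := by
    intro k hk; rw [pvS1, if_pos hk]
  apply List.ext_getElem
  · simp
  · intro i h1 h2
    have hi : i < 31 := by simpa using h2
    simp only [List.getElem_map, List.getElem_range]
    rw [hs i hi]
    rcases Nat.eq_zero_or_pos i with h0 | h0
    · subst h0; rfl
    · rw [List.getElem_append_right (by simpa using h0)]
      rw [List.getElem_replicate]
      have hne : i ≠ 0 := by omega
      simp [pvBit, hne]

theorem pvB_init2 (cInit : Int) (hc0 : 0 ≤ cInit) :
    (PySem.List.pyRange 0 31 1).map (fun i => PySem.Int.band (pvShr cInit i.toNat) 1) =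
    (List.range 31).map (fun k => pvBit (pvS2 cInit.toNat k)) := by
  obtain ⟨cn, rfl⟩ : ∃ cn : Nat, cInit = (cn : Int) := ⟨cInit.toNat, by omega⟩
  simp only [Int.toNat_natCast]
  rw [PySem.List.pyRange_one, List.map_map]
  rw [show ((31 : Int) - 0).toNat = 31 from rfl]
  apply List.map_congr_left
  intro k hk
  rw [List.mem_range] at hk
  simp only [Function.comp_apply]
  rw [show ((0 : Int) + (k : Int)).toNat = k by omega]
  rw [pvBand_one_cast]
  rw [pvS2, if_pos hk]

-- the fold step of B, as one reusable function
def pvBStep : (List Int × List Int) → Int → (List Int × List Int) :=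
  fun p i =>
    (p.1 ++ [PySem.Int.bxor (PySem.List.pyGetD p.1 (i + 3) 0) (PySem.List.pyGetD p.1 i 0)],
     p.2 ++ [PySem.Int.bxor (PySem.Int.bxor (PySem.Int.bxor (PySem.List.pyGetD p.2 (i + 3) 0)
               (PySem.List.pyGetD p.2 (i + 2) 0)) (PySem.List.pyGetD p.2 (i + 1) 0))
               (PySem.List.pyGetD p.2 i 0)])

theorem pvB_fold (c : Nat) (N : Nat) :
    (PySem.List.pyRange 0 (N : Int) 1).foldl pvBStep
      ((List.range 31).map (fun k => pvBit (pvS1 k)),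
       (List.range 31).map (fun k => pvBit (pvS2 c k))) =
    ((List.range (31 + N)).map (fun k => pvBit (pvS1 k)),
     (List.range (31 + N)).map (fun k => pvBit (pvS2 c k))) := by
  induction N with
  | zero =>
    rw [show ((0 : Nat) : Int) = 0 from rfl, PySem.List.pyRange_one_eq_nil (le_refl 0)]
    rfl
  | succ N ih =>
    rw [show ((N + 1 : Nat) : Int) = (N : Int) + 1 by push_cast; ring]
    rw [PySem.List.pyRange_one_succ_right (by omega), List.foldl_append, ih]
    show pvBStep _ ((N : Nat) : Int) = _
    rw [pvBStep]
    have e3 : ((N : Nat) : Int) + 3 = ((N + 3 : Nat) : Int) := by push_cast; ring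
    have e2 : ((N : Nat) : Int) + 2 = ((N + 2 : Nat) : Int) := by push_cast; ring
    have e1 : ((N : Nat) : Int) + 1 = ((N + 1 : Nat) : Int) := by push_cast; ring
    simp only [e3, e2, e1, PySem.List.pyGetD_natCast]
    rw [pvMapRangeGetD _ _ _ _ (show N + 3 < 31 + N by omega),
      pvMapRangeGetD _ _ _ _ (show N < 31 + N by omega),
      pvMapRangeGetD _ _ _ _ (show N + 3 < 31 + N by omega),
      pvMapRangeGetD _ _ _ _ (show N + 2 < 31 + N by omega),
      pvMapRangeGetD _ _ _ _ (show N + 1 < 31 + N by omega),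
      pvMapRangeGetD _ _ _ _ (show N < 31 + N by omega)]
    rw [pvBit_xor, pvBit_xor, pvBit_xor, pvBit_xor]
    rw [← pvS1_rec, ← pvS2_rec]
    have g1 : N + 31 = 31 + N := by omega
    have g2 : 31 + (N + 1) = (31 + N) + 1 := by omega
    rw [g1, g2, List.range_succ, List.map_append, List.map_append]
    simp

theorem pvB_char (cInit numBits : Int) (hc0 : 0 ≤ cInit) (hc : cInit < 2147483648) :
    goldSequence_alt cInit numBits =
      (List.range numBits.toNat).map (fun k => pvG cInit.toNat (1600 + k)) := by
  obtain ⟨cn, rfl⟩ : ∃ cn : Nat, cInit = (cn : Int) := ⟨cInit.toNat, by omega⟩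
  simp only [Int.toNat_natCast]
  simp only [goldSequence_alt]
  rw [show (fun (p : List Int × List Int) (i : Int) =>
      (p.1 ++ [PySem.Int.bxor (PySem.List.pyGetD p.1 (i + 3) 0) (PySem.List.pyGetD p.1 i 0)],
       p.2 ++ [PySem.Int.bxor (PySem.Int.bxor (PySem.Int.bxor (PySem.List.pyGetD p.2 (i + 3) 0)
                 (PySem.List.pyGetD p.2 (i + 2) 0)) (PySem.List.pyGetD p.2 (i + 1) 0))
                 (PySem.List.pyGetD p.2 i 0)])) = pvBStep from rfl]
  rw [show (if 0 < numBits then numBits else 0) = ((numBits.toNat : Nat) : Int) by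
    split <;> omega]
  rw [show (1600 : Int) + ((numBits.toNat : Nat) : Int) = ((1600 + numBits.toNat : Nat) : Int) by
    push_cast; ring]
  rw [pvB_init1, pvB_init2 _ (by positivity)]
  simp only [Int.toNat_natCast]
  rw [pvB_fold cn (1600 + numBits.toNat)]
  rw [PySem.List.pyRange_one, List.map_map]
  rw [show (((numBits.toNat : Nat) : Int) - 0).toNat = numBits.toNat by omega]
  apply List.map_congr_left
  intro k hk
  rw [List.mem_range] at hk
  simp only [Function.comp_apply]
  rw [show (1600 : Int) + ((0 : Int) + (k : Int)) = ((1600 + k : Nat) : Int) by push_cast; ring]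
  simp only [PySem.List.pyGetD_natCast]
  rw [pvMapRangeGetD _ _ _ _ (show 1600 + k < 31 + (1600 + numBits.toNat) by omega),
    pvMapRangeGetD _ _ _ _ (show 1600 + k < 31 + (1600 + numBits.toNat) by omega)]
  rw [pvBit_xor, pvG]

-- ===== VERDICT (by name: the statement is the Claim_ definition above) =====
theorem goldSequence_spec : Claim_unchanged_goldSequence := by
  intro cInit numBits hdom hpre hnd
  obtain ⟨hc0, hc⟩ := hpre
  show goldSequence cInit numBits = goldSequence_alt cInit numBits
  rw [pvA_char cInit numBits hc0 hc, pvB_char cInit numBits hc0 hc]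
  by_cases hnb : 0 ≤ numBits
  · rw [PySem.List.slice_to _ hnb, ← List.map_take, List.take_range]
    have hge := pvNIter_ge (numBits - 12)
    rw [show min numBits.toNat (12 + 31 * pvNIter (numBits - 12)) = numBits.toNat by omega]
  · have hle : numBits ≤ -12 := by
      unfold D_goldSequence at hnd
      omega
    have hK : pvNIter (numBits - 12) = 0 := by rw [pvNIter, if_neg (by omega)]
    rw [hK, show 12 + 31 * 0 = 12 from rfl]
    rw [show numBits.toNat = 0 from by omega, List.range_zero, List.map_nil]
    conv_lhs => rw [show numBits = -(((-numBits).toNat : Nat) : Int) by omega]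
    rw [PySem.List.slice_to_neg_natCast _ ((-numBits).toNat) (by omega)]
    rw [List.length_map, List.length_range]
    rw [show 12 - (-numBits).toNat = 0 from by omega, List.take_zero]

set_option maxRecDepth 10000 in
theorem goldSequence_changed : Claim_changed_goldSequence := by
  unfold Claim_changed_goldSequence
  exact ⟨by decide, by decide, by decide, by decide, by decide, by decide⟩

theorem goldSequence_tight : Claim_exact_goldSequence := by
  intro cInit numBits hdom hpre hd
  obtain ⟨hc0, hc⟩ := hpre
  obtain ⟨hd1, hd2⟩ := hd
  rw [pvA_char cInit numBits hc0 hc, pvB_char cInit numBits hc0 hc]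
  have hK : pvNIter (numBits - 12) = 0 := by rw [pvNIter, if_neg (by omega)]
  rw [hK, show 12 + 31 * 0 = 12 from rfl]
  rw [show numBits.toNat = 0 from by omega, List.range_zero, List.map_nil]
  conv_lhs => rw [show numBits = -(((-numBits).toNat : Nat) : Int) by omega]
  rw [PySem.List.slice_to_neg_natCast _ ((-numBits).toNat) (by omega)]
  intro hcon
  have hlen := congrArg List.length hcon
  simp [List.length_take] at hlen
  omega
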